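-- pv_equiv track=rewrite | github.com/PDevanney/Tacking-on-a-Graph | src/playable.py | get_node_colours
-- ===== SOURCE A (Python) =====
-- def get_node_colours(number_of_nodes, tower_location, target_location, visited):
--     target_colour = 'blue'
--     tower_colour = 'red'
--     unvisited_colour = 'gray'
--     visited_colour = 'green'
--
--     node_colours = []
--
--     for node in range(number_of_nodes):
--         if node in tower_location:
--             node_colours.append(tower_colour)
--         elif node == target_location:
--             node_colours.append(target_colour)
--         elif node in visited:
--             node_colours.append(visited_colour)
--         else:
--             node_colours.append(unvisited_colour)
--
--     return node_colours
-- ===== SOURCE B (Python) =====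
-- def get_node_colours(number_of_nodes, tower_location, target_location, visited):
--     # Paint a flat gray canvas, then overwrite in ascending priority:
--     # green (visited), blue (target), red (towers).
--     colours = ['gray'] * number_of_nodes
--     for v in visited:
--         if 0 <= v < number_of_nodes:
--             colours[v] = 'green'
--     if 0 <= target_location < number_of_nodes:
--         colours[target_location] = 'blue'
--     for t in tower_location:
--         if 0 <= t < number_of_nodes:
--             colours[t] = 'red'
--     return colours
-- ===== Notes on version B (the rewrite author's own statement) =====
-- stated objective: faster
-- what changed: Replaces the per-node if/elif membership-test chain over range(n) with building a flat 'gray' list once and repainting it in ascending-priority index sweeps over visited, the target, and the towers.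
import Mathlib
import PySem

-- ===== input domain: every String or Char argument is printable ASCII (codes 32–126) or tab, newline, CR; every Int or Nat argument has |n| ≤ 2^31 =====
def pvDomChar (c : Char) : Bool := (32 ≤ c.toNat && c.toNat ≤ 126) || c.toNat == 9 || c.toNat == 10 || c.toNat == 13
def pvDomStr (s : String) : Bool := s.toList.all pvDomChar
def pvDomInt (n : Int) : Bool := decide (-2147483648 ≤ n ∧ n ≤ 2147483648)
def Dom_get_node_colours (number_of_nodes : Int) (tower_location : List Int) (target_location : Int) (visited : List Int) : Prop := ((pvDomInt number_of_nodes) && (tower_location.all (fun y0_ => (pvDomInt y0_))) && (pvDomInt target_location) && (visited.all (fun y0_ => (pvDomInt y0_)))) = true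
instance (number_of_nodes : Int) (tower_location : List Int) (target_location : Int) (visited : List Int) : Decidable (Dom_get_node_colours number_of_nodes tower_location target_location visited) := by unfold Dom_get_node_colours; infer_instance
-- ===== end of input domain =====

-- B builds a flat gray list and repaints it in ascending-priority sweeps (green, blue, red)
-- instead of A's per-node if/elif membership chain; objective: alternative decomposition.

-- ===== PORT A =====
def get_node_colours (number_of_nodes : Int) (tower_location : List Int) (target_location : Int) (visited : List Int) : List String :=
  (PySem.List.pyRange 0 number_of_nodes 1).foldl (fun node_colours node =>
    if tower_location.contains node then node_colours ++ ["red"]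
    else if node == target_location then node_colours ++ ["blue"]
    else if visited.contains node then node_colours ++ ["green"]
    else node_colours ++ ["gray"]) []

-- ===== PORT B =====
-- paint every in-range position listed in L with colour c
def pvPaint (n : Int) (c : String) (acc : List String) (L : List Int) : List String :=
  L.foldl (fun a i => if 0 ≤ i ∧ i < n then a.set i.toNat c else a) acc

def get_node_colours_alt (number_of_nodes : Int) (tower_location : List Int) (target_location : Int) (visited : List Int) : List String :=
  let colours := List.replicate number_of_nodes.toNat "gray"
  let colours := pvPaint number_of_nodes "green" colours visited
  let colours := if 0 ≤ target_location ∧ target_location < number_of_nodes then colours.set target_location.toNat "blue" else colours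
  pvPaint number_of_nodes "red" colours tower_location

-- ===== PRECONDITION & SPEC =====
def Spec_get_node_colours (number_of_nodes : Int) (tower_location : List Int) (target_location : Int) (visited : List Int) (out : List String) : Prop := out = get_node_colours_alt number_of_nodes tower_location target_location visited
instance (number_of_nodes : Int) (tower_location : List Int) (target_location : Int) (visited : List Int) (out : List String) : Decidable (Spec_get_node_colours number_of_nodes tower_location target_location visited out) := by unfold Spec_get_node_colours; infer_instance

-- ===== CLAIM (what is proved, stated in full; the proofs are below) =====
def Claim_equal_get_node_colours : Prop := ∀ (number_of_nodes : Int) (tower_location : List Int) (target_location : Int) (visited : List Int), Dom_get_node_colours number_of_nodes tower_location target_location visited → Spec_get_node_colours number_of_nodes tower_location target_location visited (get_node_colours number_of_nodes tower_location target_location visited)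

-- ===== LEMMAS AND PROOFS =====

lemma foldl_append_map (f : Int → String) (L : List Int) (acc : List String) :
    L.foldl (fun a x => a ++ [f x]) acc = acc ++ L.map f := by
  induction L generalizing acc with
  | nil => simp
  | cons i L ih => simp [List.foldl_cons, ih]

lemma length_pvPaint (n : Int) (c : String) (acc : List String) (L : List Int) :
    (pvPaint n c acc L).length = acc.length := by
  induction L generalizing acc with
  | nil => rfl
  | cons i L ih =>
    simp only [pvPaint, List.foldl_cons] at *
    rw [ih]; split <;> simp

lemma getElem_pvPaint (n : Int) (c : String) (acc : List String) (L : List Int)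
    (j : Nat) (hjn : (j : Int) < n) (hj : j < acc.length) :
    (pvPaint n c acc L)[j]'(by rw [length_pvPaint]; exact hj) =
      if L.contains (j : Int) then c else acc[j] := by
  induction L generalizing acc with
  | nil => simp [pvPaint]
  | cons i L ih =>
    have hstep : pvPaint n c acc (i :: L) =
        pvPaint n c (if 0 ≤ i ∧ i < n then acc.set i.toNat c else acc) L := rfl
    by_cases hg : 0 ≤ i ∧ i < n
    · have hlen : j < (acc.set i.toNat c).length := by simpa using hj
      have hrw : pvPaint n c acc (i :: L) = pvPaint n c (acc.set i.toNat c) L := by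
        rw [hstep, if_pos hg]
      rw [List.getElem_of_eq hrw, ih (acc.set i.toNat c) hlen]
      by_cases hL : L.contains (j : Int)
      · have hLm : (j : Int) ∈ L := by simpa using hL
        simp [hLm]
      · have hLm : (j : Int) ∉ L := by simpa using hL
        have hset : (acc.set i.toNat c)[j]'hlen = if i.toNat = j then c else acc[j] := by
          rw [List.getElem_set]
        by_cases hij : i = (j : Int)
        · have h2 : i.toNat = j := by omega
          simp [hset, hLm, hij, h2]
        · have h2 : i.toNat ≠ j := by omega
          have hij' : (j : Int) ≠ i := by omega
          simp [hset, hLm, h2, hij']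
    · have hrw : pvPaint n c acc (i :: L) = pvPaint n c acc L := by rw [hstep, if_neg hg]
      rw [List.getElem_of_eq hrw, ih acc hj]
      have hij' : (j : Int) ≠ i := by omega
      simp [hij']

lemma length_A (n : Int) (tl : List Int) (tg : Int) (vd : List Int) :
    (get_node_colours n tl tg vd).length = n.toNat := by
  have : get_node_colours n tl tg vd =
      (PySem.List.pyRange 0 n 1).map (fun node =>
        if tl.contains node then "red"
        else if node == tg then "blue"
        else if vd.contains node then "green" else "gray") := by
    unfold get_node_colours
    have := foldl_append_map (fun node =>
        if tl.contains node then "red"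
        else if node == tg then "blue"
        else if vd.contains node then "green" else "gray") (PySem.List.pyRange 0 n 1) []
    simp only [List.nil_append] at this
    rw [← this]
    congr 1
    funext a x
    by_cases h1 : tl.contains x <;> by_cases h2 : x == tg <;>
      by_cases h3 : vd.contains x <;> simp_all
  rw [this]
  simp [PySem.List.length_pyRange_one]

-- ===== VERDICT (by name: the statement is the Claim_ definition above) =====
theorem get_node_colours_spec : Claim_equal_get_node_colours := by
  intro n tl tg vd _
  unfold Spec_get_node_colours
  set f : Int → String := fun node =>
    if tl.contains node then "red"
    else if node == tg then "blue"
    else if vd.contains node then "green" else "gray" with hf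
  have hA : get_node_colours n tl tg vd = (PySem.List.pyRange 0 n 1).map f := by
    unfold get_node_colours
    have hfm := foldl_append_map f (PySem.List.pyRange 0 n 1) []
    simp only [List.nil_append] at hfm
    rw [← hfm]
    congr 1
    funext a x
    simp only [hf]
    by_cases h1 : tl.contains x <;> by_cases h2 : x == tg <;>
      by_cases h3 : vd.contains x <;> simp_all
  have hlenrep : (List.replicate n.toNat "gray").length = n.toNat := by simp
  have hlenmid : (pvPaint n "green" (List.replicate n.toNat "gray") vd).length = n.toNat := by
    rw [length_pvPaint]; simp
  have hlenmid2 : (if 0 ≤ tg ∧ tg < n then (pvPaint n "green" (List.replicate n.toNat "gray") vd).set tg.toNat "blue" else (pvPaint n "green" (List.replicate n.toNat "gray") vd)).length = n.toNat := by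
    split <;> simp [hlenmid]
  have hlenB : (get_node_colours_alt n tl tg vd).length = n.toNat := by
    unfold get_node_colours_alt
    simp only []
    rw [length_pvPaint, hlenmid2]
  have hlenA : (get_node_colours n tl tg vd).length = n.toNat := length_A n tl tg vd
  apply List.ext_getElem
  · rw [hlenA, hlenB]
  · intro j hj1 hj2
    rw [hlenA] at hj1
    have hjn : (j : Int) < n := by omega
    -- A side
    have hAj : (get_node_colours n tl tg vd)[j]'(by rw [hlenA]; exact hj1) = f j := by
      have hlt : j < ((PySem.List.pyRange 0 n 1).map f).length := by
        simp [PySem.List.length_pyRange_one]; omega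
      have : (get_node_colours n tl tg vd)[j]'(by rw [hlenA]; exact hj1) =
          ((PySem.List.pyRange 0 n 1).map f)[j]'hlt := by
        congr 1
      rw [this, List.getElem_map, PySem.List.getElem_pyRange_one]
      simp
    -- B side
    have hBj : (get_node_colours_alt n tl tg vd)[j]'(by rw [hlenB]; exact hj1) = f j := by
      unfold get_node_colours_alt
      simp only []
      rw [getElem_pvPaint n "red" _ tl j hjn (by rw [hlenmid2]; exact hj1)]
      by_cases htl : tl.contains (j : Int)
      · have htlm : (j:Int) ∈ tl := by simpa using htl
        simp [hf, htlm]
      · rw [if_neg htl]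
        have htl' : (j:Int) ∉ tl := by simpa using htl
        by_cases hg : 0 ≤ tg ∧ tg < n
        · simp only [if_pos hg]
          have hset : ((pvPaint n "green" (List.replicate n.toNat "gray") vd).set tg.toNat "blue")[j]'(by simp [hlenmid]; omega) =
              if tg.toNat = j then "blue" else (pvPaint n "green" (List.replicate n.toNat "gray") vd)[j]'(by rw [hlenmid]; exact hj1) := by
            rw [List.getElem_set]
          rw [hset]
          by_cases htg : tg = (j : Int)
          · have : tg.toNat = j := by omega
            simp [hf, htl', this, htg]
          · have htn : tg.toNat ≠ j := by omega
            rw [if_neg htn]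
            rw [getElem_pvPaint n "green" _ vd j hjn (by simp; omega)]
            have hne : (j:Int) ≠ tg := by omega
            by_cases hvd : vd.contains (j : Int) <;> simp_all [hf, beq_iff_eq]
        · simp only [if_neg hg]
          rw [getElem_pvPaint n "green" _ vd j hjn (by simp; omega)]
          have hne : (j:Int) ≠ tg := by omega
          by_cases hvd : vd.contains (j : Int) <;> simp_all [hf, beq_iff_eq]
    rw [hAj, hBj]
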